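-- pv_equiv track=rewrite | github.com/Psimcoe3/simcoe.ai | scripts/build_estimate_index.py | _build_lookup_key
-- ===== SOURCE A (Python) =====
-- def _build_lookup_key(record: dict) -> str:
--     parts = []
--     for key in ("category", "family_name", "manufacturer", "part_number", "description"):
--         value = record.get(key)
--         if value:
--             parts.append(value.lower())
--     normalized = []
--     for char in "|".join(parts):
--         normalized.append(char if char.isalnum() else "-")
--     joined = "".join(normalized)
--     while "--" in joined:
--         joined = joined.replace("--", "-")
--     return joined.strip("-")
-- ===== SOURCE B (Python) =====
-- def _build_lookup_key(record: dict) -> str: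
--     parts = []
--     for key in ("category", "family_name", "manufacturer", "part_number", "description"):
--         value = record.get(key)
--         if value:
--             parts.append(value.lower())
--     out = []
--     pending = False
--     for ch in "|".join(parts):
--         if ch.isalnum():
--             if pending and out:
--                 out.append("-")
--             out.append(ch)
--             pending = False
--         else:
--             pending = True
--     return "".join(out)
-- ===== Notes on version B (the rewrite author's own statement) =====
-- stated objective: alternative
-- what changed: Replaces A's build-normalized-char-list + repeated whole-string replace('--','-') passes + final strip('-') with a single left-to-right pass carrying a pending-separator flag that emits each alnum char and at most one '-' between runs, so no squeeze re-scan or end-trimming is needed.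
import Mathlib
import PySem

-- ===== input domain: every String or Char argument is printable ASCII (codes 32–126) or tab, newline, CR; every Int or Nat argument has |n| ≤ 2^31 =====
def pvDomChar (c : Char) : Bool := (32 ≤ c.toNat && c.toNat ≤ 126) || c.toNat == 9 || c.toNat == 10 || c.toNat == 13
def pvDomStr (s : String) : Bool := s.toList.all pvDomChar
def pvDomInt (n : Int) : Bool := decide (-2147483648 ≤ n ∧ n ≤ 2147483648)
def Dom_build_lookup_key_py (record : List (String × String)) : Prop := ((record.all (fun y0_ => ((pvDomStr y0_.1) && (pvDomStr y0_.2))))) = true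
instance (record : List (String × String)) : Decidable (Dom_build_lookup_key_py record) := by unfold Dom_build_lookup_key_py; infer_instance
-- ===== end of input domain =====

-- B replaces A's repeated whole-string replace("--","-") loop and final strip("-") with one
-- left-to-right pass carrying a pending-separator flag (objective: alternative single-pass strategy).

-- ===== PORT A =====
-- helper recursions used only to prove termination of A's while-loop port:
-- `rep` is one replace("--","-") pass, `hasDD` is '"--" in s'.
def pvRep : List Char → List Char
  | a :: b :: t => if a = '-' ∧ b = '-' then '-' :: pvRep t else a :: pvRep (b :: t)
  | l => l

def pvHasDD : List Char → Bool
  | a :: b :: t => (a = '-' && b = '-') || pvHasDD (b :: t)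
  | _ => false

theorem pvRep_nil : pvRep [] = [] := by
  rw [pvRep]
  intro a b t h
  simp at h

theorem pvRep_one (c : Char) : pvRep [c] = [c] := by
  rw [pvRep]
  intro a b t h
  simp at h

theorem pvRep_go (fuel : Nat) : ∀ (l acc : List Char), l.length ≤ fuel →
    PySem.Chars.replace.go ['-', '-'] ['-'] fuel l acc = acc.reverse ++ pvRep l := by
  induction fuel with
  | zero =>
    intro l acc h
    have : l = [] := List.eq_nil_of_length_eq_zero (Nat.le_zero.mp h)
    subst this
    rw [PySem.Chars.replace.go]
    simp [pvRep]
  | succ fuel ih =>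
    intro l acc h
    match l with
    | [] =>
      rw [PySem.Chars.replace.go]
      simp [pvRep]
      omega
    | [c] =>
      rw [PySem.Chars.replace.go]
      have hp : List.isPrefixOf ['-', '-'] [c] = false := by
        simp [List.isPrefixOf]
      simp only [hp, Bool.false_eq_true, if_false]
      rw [ih [] (c :: acc) (by simp)]
      simp [pvRep]
    | a :: b :: t =>
      rw [PySem.Chars.replace.go]
      by_cases hab : a = '-' ∧ b = '-'
      · obtain ⟨ha, hb⟩ := hab; subst ha; subst hb
        have hp : List.isPrefixOf ['-', '-'] ('-' :: '-' :: t) = true := by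
          simp [List.isPrefixOf]
        simp only [hp, if_true]
        rw [ih _ _ (by simp at h ⊢; omega)]
        simp [pvRep]
      · have hne : ¬('-' = a ∧ '-' = b) := fun hc => hab ⟨hc.1.symm, hc.2.symm⟩
        have hp : List.isPrefixOf ['-', '-'] (a :: b :: t) = false := by
          simp only [List.isPrefixOf, List.isPrefixOf_nil_left, Bool.and_true]
          rw [Bool.and_eq_false_iff]
          by_cases h1 : '-' = a
          · right
            rw [beq_eq_false_iff_ne]
            exact fun h2 => hne ⟨h1, h2⟩
          · left
            rw [beq_eq_false_iff_ne]
            exact h1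
        simp only [hp, Bool.false_eq_true, if_false]
        rw [ih _ _ (by simp at h ⊢; omega)]
        rw [pvRep, if_neg hab]
        simp

theorem pvReplace_eq_rep (l : List Char) :
    PySem.Chars.replace l ['-', '-'] ['-'] = pvRep l := by
  rw [PySem.Chars.replace]
  simp only [List.isEmpty_cons, Bool.false_eq_true, if_false]
  exact pvRep_go l.length l [] le_rfl

theorem pvRep_length_le : ∀ (l : List Char), (pvRep l).length ≤ l.length
  | [] => by rw [pvRep_nil]
  | [c] => by rw [pvRep_one]
  | a :: b :: t => by
    rw [pvRep]
    by_cases hab : a = '-' ∧ b = '-'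
    · rw [if_pos hab]
      have := pvRep_length_le t
      simp only [List.length_cons]
      omega
    · rw [if_neg hab]
      have := pvRep_length_le (b :: t)
      simp only [List.length_cons] at this ⊢
      omega

theorem pvRep_length_lt : ∀ (l : List Char), pvHasDD l = true → (pvRep l).length < l.length
  | [] => by intro h; simp [pvHasDD] at h
  | [c] => by intro h; simp [pvHasDD] at h
  | a :: b :: t => by
    intro h
    rw [pvRep]
    by_cases hab : a = '-' ∧ b = '-'
    · rw [if_pos hab]
      have := pvRep_length_le t
      simp only [List.length_cons]
      omega
    · rw [if_neg hab]
      have hdd : pvHasDD (b :: t) = true := by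
        rw [pvHasDD] at h
        rcases Bool.or_eq_true_iff.mp h with h1 | h1
        · rw [Bool.and_eq_true, decide_eq_true_eq, decide_eq_true_eq] at h1
          exact absurd h1 hab
        · exact h1
      have := pvRep_length_lt (b :: t) hdd
      simp only [List.length_cons] at this ⊢
      omega

theorem pvInfix_iff_hasDD (l : List Char) : ['-', '-'] <:+: l ↔ pvHasDD l = true := by
  induction l with
  | nil => simp [pvHasDD]
  | cons a t ih =>
    rw [List.infix_cons_iff]
    match t with
    | [] =>
      simp only [pvHasDD]
      constructor
      · rintro (hp | hi)
        · exact absurd (List.IsPrefix.length_le hp) (by simp)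
        · exact absurd (List.IsInfix.length_le hi) (by simp)
      · simp
    | b :: t' =>
      simp only [pvHasDD, Bool.or_eq_true, Bool.and_eq_true, decide_eq_true_eq]
      constructor
      · rintro (hp | hi)
        · rw [List.cons_prefix_cons] at hp
          obtain ⟨ha, hp⟩ := hp
          rw [List.cons_prefix_cons] at hp
          exact Or.inl ⟨ha.symm, hp.1.symm⟩
        · exact Or.inr (ih.mp hi)
      · rintro (⟨ha, hb⟩ | h)
        · subst ha; subst hb
          exact Or.inl ⟨t', by simp⟩
        · exact Or.inr (ih.mpr h)

theorem pvIsIn_eq_hasDD (l : List Char) : PySem.Chars.isIn ['-', '-'] l = pvHasDD l := by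
  by_cases h : pvHasDD l = true
  · rw [h, (PySem.Chars.isIn_iff_infix _ _).mpr ((pvInfix_iff_hasDD l).mpr h)]
  · rw [Bool.not_eq_true] at h
    rw [h, (PySem.Chars.isIn_eq_false_iff _ _).mpr (fun hc => by
      rw [(pvInfix_iff_hasDD l).mp hc] at h; simp at h)]

-- A's while-loop: while "--" in joined: joined = joined.replace("--", "-")
def pvWhileA (js : List Char) : List Char :=
  if PySem.Chars.isIn ['-', '-'] js then pvWhileA (PySem.Chars.replace js ['-', '-'] ['-']) else js
termination_by js.length
decreasing_by
  rw [pvReplace_eq_rep]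
  exact pvRep_length_lt js (by rw [← pvIsIn_eq_hasDD]; assumption)

def pvKeys : List String := ["category", "family_name", "manufacturer", "part_number", "description"]

def build_lookup_key_py (record : List (String × String)) : String :=
  let parts : List (List Char) :=
    pvKeys.foldl (fun parts key =>
      match (PySem.Dict.mk record).get? key with
      | none => parts
      | some value =>
        if value.toList.isEmpty then parts else parts ++ [PySem.Chars.lower value.toList]) []
  let normalized : List Char :=
    (PySem.Chars.join ['|'] parts).map (fun c => if PySem.Chars.isalnum c then c else '-')
  let joined : List Char := pvWhileA normalized
  String.mk (PySem.Chars.stripChars joined ['-'])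

-- ===== PORT B =====
def build_lookup_key_py_alt (record : List (String × String)) : String :=
  let parts : List (List Char) :=
    pvKeys.foldl (fun parts key =>
      match (PySem.Dict.mk record).get? key with
      | none => parts
      | some value =>
        if value.toList.isEmpty then parts else parts ++ [PySem.Chars.lower value.toList]) []
  let st : List Char × Bool :=
    (PySem.Chars.join ['|'] parts).foldl
      (fun (st : List Char × Bool) ch =>
        if PySem.Chars.isalnum ch then
          ((st.1 ++ (if st.2 && !st.1.isEmpty then ['-'] else [])) ++ [ch], false)
        else (st.1, true))
      ([], false)
  String.mk st.1

-- ===== PRECONDITION & SPEC =====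
def Spec_build_lookup_key_py (record : List (String × String)) (out : String) : Prop := out = build_lookup_key_py_alt record
instance (record : List (String × String)) (out : String) : Decidable (Spec_build_lookup_key_py record out) := by unfold Spec_build_lookup_key_py; infer_instance

-- ===== CLAIM (what is proved, stated in full; the proofs are below) =====
def Claim_equal_build_lookup_key_py : Prop := ∀ (record : List (String × String)), Dom_build_lookup_key_py record → Spec_build_lookup_key_py record (build_lookup_key_py record)

-- ===== LEMMAS AND PROOFS =====

-- squeeze: collapse every maximal run of '-' to a single '-'
def pvSq : List Char → List Char
  | [] => []
  | c :: t => if c = '-' then '-' :: pvSq (t.dropWhile (· = '-')) else c :: pvSq t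
termination_by l => l.length
decreasing_by
  · have := List.length_dropWhile_le (fun c => decide (c = '-')) t
    simp; omega
  · simp

def pvDashB (c : Char) : Bool := c = '-'
def pvLstrip (l : List Char) : List Char := l.dropWhile pvDashB
def pvRstrip (l : List Char) : List Char := (l.reverse.dropWhile pvDashB).reverse

-- B-side suffix semantics: output appended once `out` is nonempty (pending = p)
def pvGTail : List Char → Bool → List Char
  | [], _ => []
  | c :: t, p =>
    if PySem.Chars.isalnum c then (if p then ['-'] else []) ++ c :: pvGTail t false
    else pvGTail t true

-- B-side semantics from the empty output
def pvGHead : List Char → List Char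
  | [] => []
  | c :: t => if PySem.Chars.isalnum c then c :: pvGTail t false else pvGHead t

def pvF (c : Char) : Char := if PySem.Chars.isalnum c then c else '-'

theorem pvSq_nil : pvSq [] = [] := by rw [pvSq]
theorem pvSq_cons (c : Char) (t : List Char) :
    pvSq (c :: t) = if c = '-' then '-' :: pvSq (t.dropWhile (· = '-')) else c :: pvSq t := by
  rw [pvSq]

theorem pvRstrip_cons_of_ne (c : Char) (r : List Char) (h : ¬ c = '-') :
    pvRstrip (c :: r) = c :: pvRstrip r := by
  unfold pvRstrip
  rw [show (c :: r).reverse = r.reverse ++ [c] from by simp, List.dropWhile_append]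
  by_cases he : (r.reverse.dropWhile pvDashB).isEmpty
  · rw [if_pos he]
    rw [List.isEmpty_iff] at he
    simp [he, pvDashB, h]
  · rw [if_neg he]
    simp

theorem pvRstrip_cons_of_ne_nil (c : Char) (r : List Char) (h : pvRstrip r ≠ []) :
    pvRstrip (c :: r) = c :: pvRstrip r := by
  unfold pvRstrip at h ⊢
  rw [show (c :: r).reverse = r.reverse ++ [c] from by simp, List.dropWhile_append]
  have he : (r.reverse.dropWhile pvDashB).isEmpty = false := by
    rw [List.isEmpty_eq_false_iff]
    intro hc; exact h (by rw [hc]; simp)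
  rw [he]
  simp

theorem pvRstrip_dash : pvRstrip ['-'] = [] := by
  unfold pvRstrip; simp [pvDashB]

theorem pvNotDash_of_isalnum (c : Char) (h : PySem.Chars.isalnum c = true) : ¬ c = '-' := by
  intro hc; subst hc
  rw [show PySem.Chars.isalnum '-' = false from by decide] at h
  exact Bool.false_ne_true h

-- gTail against squeeze-and-rstrip of the dash-mapped list
theorem pvGTail_spec (j : List Char) :
    pvGTail j false = pvRstrip (pvSq (j.map pvF)) ∧
    pvGTail j true = pvRstrip (pvSq ('-' :: j.map pvF)) := by
  induction j with
  | nil =>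
    constructor
    · simp [pvGTail, pvSq_nil, pvRstrip]
    · simp [pvGTail, pvSq_cons, pvSq_nil, pvRstrip_dash]
  | cons c t ih =>
    obtain ⟨ihf, iht⟩ := ih
    by_cases hc : PySem.Chars.isalnum c = true
    · have hne := pvNotDash_of_isalnum c hc
      have hfc : pvF c = c := by simp [pvF, hc]
      constructor
      · simp only [pvGTail, hc, if_true, if_false, List.map_cons, hfc]
        rw [pvSq_cons, if_neg hne, pvRstrip_cons_of_ne c _ hne, ihf]
        simp
      · simp only [pvGTail, hc, if_true, List.map_cons, hfc]
        rw [pvSq_cons, if_pos rfl]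
        have hdw : (c :: t.map pvF).dropWhile (· = '-') = c :: t.map pvF := by
          rw [List.dropWhile_cons_of_neg (by simpa using hne)]
        rw [hdw, pvSq_cons, if_neg hne]
        rw [pvRstrip_cons_of_ne_nil '-' _ (by
          rw [pvRstrip_cons_of_ne c _ hne]; simp)]
        rw [pvRstrip_cons_of_ne c _ hne, ihf]
        simp
    · have hfc : pvF c = '-' := by simp [pvF, hc]
      have hcf : PySem.Chars.isalnum c = false := by simpa using hc
      constructor
      · simp only [pvGTail, hcf, Bool.false_eq_true, if_false, List.map_cons, hfc]
        exact iht
      · simp only [pvGTail, hcf, Bool.false_eq_true, if_false, List.map_cons, hfc]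
        rw [iht]
        rw [pvSq_cons, if_pos rfl, pvSq_cons, if_pos rfl]
        rw [List.dropWhile_cons_of_pos (by simp)]

-- lstrip of a squeeze is the squeeze of the dash-stripped list
theorem pvLstrip_sq (m : List Char) :
    pvLstrip (pvSq m) = pvSq (m.dropWhile (· = '-')) := by
  match m with
  | [] => simp [pvSq_nil, pvLstrip]
  | c :: t =>
    by_cases hc : c = '-'
    · subst hc
      rw [pvSq_cons, if_pos rfl, List.dropWhile_cons_of_pos (by simp)]
      unfold pvLstrip
      rw [List.dropWhile_cons_of_pos (by simp [pvDashB])]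
      generalize hu : t.dropWhile (· = '-') = u
      match u with
      | [] => simp [pvSq_nil, pvLstrip]
      | b :: u' =>
        have hb : ¬ b = '-' := by
          have := List.head_dropWhile_not (p := fun c => decide (c = '-')) (l := t)
          rw [hu] at this
          simpa using this (by simp)
        rw [pvSq_cons, if_neg hb, List.dropWhile_cons_of_neg (by simp [pvDashB, hb])]
    · rw [pvSq_cons, if_neg hc, List.dropWhile_cons_of_neg (by simpa using hc)]
      unfold pvLstrip
      rw [List.dropWhile_cons_of_neg (by simp [pvDashB, hc]), pvSq_cons, if_neg hc]

theorem pvGHead_spec (j : List Char) :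
    pvGHead j = pvRstrip (pvLstrip (pvSq (j.map pvF))) := by
  induction j with
  | nil => simp [pvGHead, pvSq_nil, pvLstrip, pvRstrip]
  | cons c t ih =>
    by_cases hc : PySem.Chars.isalnum c = true
    · have hne := pvNotDash_of_isalnum c hc
      have hfc : pvF c = c := by simp [pvF, hc]
      simp only [pvGHead, hc, if_true, List.map_cons, hfc]
      rw [pvSq_cons, if_neg hne]
      unfold pvLstrip
      rw [List.dropWhile_cons_of_neg (by simp [pvDashB, hne])]
      rw [pvRstrip_cons_of_ne c _ hne]
      rw [(pvGTail_spec t).1]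
    · have hfc : pvF c = '-' := by simp [pvF, hc]
      have hcf : PySem.Chars.isalnum c = false := by simpa using hc
      simp only [pvGHead, hcf, Bool.false_eq_true, if_false, List.map_cons, hfc]
      rw [ih]
      rw [pvSq_cons, if_pos rfl]
      unfold pvLstrip
      rw [List.dropWhile_cons_of_pos (by simp [pvDashB])]
      have h1 : (pvSq (t.map pvF)).dropWhile pvDashB
          = (pvSq ((t.map pvF).dropWhile (· = '-'))).dropWhile pvDashB := by
        have := pvLstrip_sq (t.map pvF)
        unfold pvLstrip at this
        rw [this]
        generalize hu : (t.map pvF).dropWhile (· = '-') = u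
        match u with
        | [] => simp [pvSq_nil]
        | b :: u' =>
          have hb : ¬ b = '-' := by
            have := List.head_dropWhile_not (p := fun c => decide (c = '-')) (l := t.map pvF)
            rw [hu] at this
            simpa using this (by simp)
          rw [pvSq_cons, if_neg hb, List.dropWhile_cons_of_neg (by simp [pvDashB, hb])]
      rw [h1]

-- squeeze is invariant under one replace("--","-") pass
theorem pvSq_rep_aux : ∀ (n : Nat) (u : List Char), u.length ≤ n →
    pvSq (pvRep u) = pvSq u ∧
    pvSq ((pvRep u).dropWhile (· = '-')) = pvSq (u.dropWhile (· = '-')) := by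
  intro n
  induction n with
  | zero =>
    intro u h
    have : u = [] := List.eq_nil_of_length_eq_zero (Nat.le_zero.mp h)
    subst this
    exact ⟨by rw [pvRep_nil], by rw [pvRep_nil]⟩
  | succ n ih =>
    intro u h
    match u with
    | [] => exact ⟨by rw [pvRep_nil], by rw [pvRep_nil]⟩
    | [c] => exact ⟨by rw [pvRep_one], by rw [pvRep_one]⟩
    | a :: b :: t =>
      by_cases hab : a = '-' ∧ b = '-'
      · obtain ⟨ha, hb⟩ := hab; subst ha; subst hb
        have hrep : pvRep ('-' :: '-' :: t) = '-' :: pvRep t := by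
          rw [pvRep]; simp
        have iht := ih t (by simp at h; omega)
        constructor
        · rw [hrep, pvSq_cons, if_pos rfl, pvSq_cons, if_pos rfl]
          rw [List.dropWhile_cons_of_pos (by simp)]
          rw [iht.2]
        · rw [hrep, List.dropWhile_cons_of_pos (by simp),
            List.dropWhile_cons_of_pos (by simp), List.dropWhile_cons_of_pos (by simp)]
          have iht2 := ih (pvRep t) (le_trans (pvRep_length_le t) (by simp at h; omega))
          -- dropWhile of pvRep t vs dropWhile of t : use iht.2 directly
          exact iht.2
      · have hrep : pvRep (a :: b :: t) = a :: pvRep (b :: t) := by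
          rw [pvRep]; simp [hab]
        have ihbt := ih (b :: t) (by simp at h ⊢; omega)
        by_cases ha : a = '-'
        · subst ha
          have hb : ¬ b = '-' := fun hb => hab ⟨rfl, hb⟩
          have hrepbt : pvRep (b :: t) = b :: pvRep t := by
            match t with
            | [] => rw [pvRep_one, pvRep_nil]
            | c :: t' =>
              rw [pvRep, if_neg (fun h' => hb h'.1)]
          have iht := ih t (by simp at h; omega)
          constructor
          · rw [hrep, pvSq_cons, if_pos rfl, pvSq_cons, if_pos rfl]
            rw [hrepbt, List.dropWhile_cons_of_neg (by simpa using hb),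
              List.dropWhile_cons_of_neg (by simpa using hb)]
            rw [pvSq_cons, if_neg hb, pvSq_cons, if_neg hb, iht.1]
          · rw [hrep, List.dropWhile_cons_of_pos (by simp),
              List.dropWhile_cons_of_pos (by simp)]
            rw [hrepbt, List.dropWhile_cons_of_neg (by simpa using hb),
              List.dropWhile_cons_of_neg (by simpa using hb)]
            rw [pvSq_cons, if_neg hb, pvSq_cons, if_neg hb, iht.1]
        · constructor
          · rw [hrep, pvSq_cons, if_neg ha, pvSq_cons, if_neg ha, ihbt.1]
          · rw [hrep, List.dropWhile_cons_of_neg (by simpa using ha),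
              List.dropWhile_cons_of_neg (by simpa using ha)]
            rw [pvSq_cons, if_neg ha, pvSq_cons, if_neg ha, ihbt.1]

theorem pvSq_rep (u : List Char) : pvSq (pvRep u) = pvSq u :=
  (pvSq_rep_aux u.length u le_rfl).1

theorem pvSq_of_not_hasDD : ∀ (n : Nat) (u : List Char), u.length ≤ n →
    pvHasDD u = false → pvSq u = u := by
  intro n
  induction n with
  | zero =>
    intro u h _
    have : u = [] := List.eq_nil_of_length_eq_zero (Nat.le_zero.mp h)
    subst this; exact pvSq_nil
  | succ n ih =>
    intro u h hdd
    match u with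
    | [] => exact pvSq_nil
    | c :: t =>
      by_cases hc : c = '-'
      · subst hc
        match t with
        | [] => rw [pvSq_cons]; simp [pvSq_nil]
        | b :: t' =>
          have hb : ¬ b = '-' := by
            intro hb; subst hb
            simp [pvHasDD] at hdd
          have hddt : pvHasDD (b :: t') = false := by
            match t' with
            | [] => simp [pvHasDD]
            | d :: t'' =>
              simp only [pvHasDD, Bool.or_eq_false_iff] at hdd ⊢
              exact hdd.2
          rw [pvSq_cons, if_pos rfl, List.dropWhile_cons_of_neg (by simpa using hb)]
          rw [ih (b :: t') (by simp at h ⊢; omega) hddt]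
      · have hddt : pvHasDD t = false := by
          match t with
          | [] => rfl
          | b :: t' =>
            simp only [pvHasDD, Bool.or_eq_false_iff] at hdd ⊢
            exact hdd.2
        rw [pvSq_cons, if_neg hc, ih t (by simp at h; omega) hddt]

theorem pvWhileA_eq_sq : ∀ (n : Nat) (m : List Char), m.length ≤ n → pvWhileA m = pvSq m := by
  intro n
  induction n with
  | zero =>
    intro m h
    have : m = [] := List.eq_nil_of_length_eq_zero (Nat.le_zero.mp h)
    subst this
    rw [pvWhileA, if_neg (by rw [show PySem.Chars.isIn ['-', '-'] ([] : List Char) = false from by decide]; exact Bool.false_ne_true)]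
    exact pvSq_nil.symm
  | succ n ih =>
    intro m h
    rw [pvWhileA]
    by_cases hdd : pvHasDD m = true
    · rw [if_pos (by rw [pvIsIn_eq_hasDD]; exact hdd)]
      rw [pvReplace_eq_rep]
      rw [ih (pvRep m) (by have := pvRep_length_lt m hdd; omega)]
      exact pvSq_rep m
    · rw [if_neg (by rw [pvIsIn_eq_hasDD]; exact fun hc => hdd hc)]
      rw [pvSq_of_not_hasDD m.length m le_rfl (by simpa using hdd)]

-- B's fold characterized by pvGTail / pvGHead
theorem pvFoldB_tail (j : List Char) : ∀ (out : List Char) (p : Bool), out ≠ [] →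
    (j.foldl (fun (st : List Char × Bool) ch =>
        if PySem.Chars.isalnum ch then
          ((st.1 ++ (if st.2 && !st.1.isEmpty then ['-'] else [])) ++ [ch], false)
        else (st.1, true)) (out, p)).1 = out ++ pvGTail j p := by
  induction j with
  | nil => intro out p _; simp [pvGTail]
  | cons c t ih =>
    intro out p hout
    by_cases hc : PySem.Chars.isalnum c = true
    · simp only [List.foldl_cons, hc, if_true]
      have hne : out.isEmpty = false := by simpa [List.isEmpty_eq_false_iff] using hout
      rw [ih _ false (by simp)]
      simp only [pvGTail, hc, if_true, hne, Bool.not_false, Bool.and_true]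
      cases p <;> simp [List.append_assoc]
    · have hcf : PySem.Chars.isalnum c = false := by simpa using hc
      simp only [List.foldl_cons, hcf, Bool.false_eq_true, if_false]
      rw [ih out true hout]
      simp [pvGTail, hcf]

theorem pvFoldB_head (j : List Char) : ∀ (p : Bool),
    (j.foldl (fun (st : List Char × Bool) ch =>
        if PySem.Chars.isalnum ch then
          ((st.1 ++ (if st.2 && !st.1.isEmpty then ['-'] else [])) ++ [ch], false)
        else (st.1, true)) ([], p)).1 = pvGHead j := by
  induction j with
  | nil => intro p; simp [pvGHead]
  | cons c t ih =>
    intro p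
    by_cases hc : PySem.Chars.isalnum c = true
    · simp only [List.foldl_cons, hc, if_true, List.isEmpty_nil, Bool.not_true,
        Bool.and_false, Bool.false_eq_true, if_false, List.nil_append]
      rw [pvFoldB_tail t [c] false (by simp)]
      simp [pvGHead, hc]
    · have hcf : PySem.Chars.isalnum c = false := by simpa using hc
      simp only [List.foldl_cons, hcf, Bool.false_eq_true, if_false]
      rw [ih true]
      simp [pvGHead, hcf]

-- strip('-') is rstrip ∘ lstrip
theorem pvStripChars_eq (s : List Char) :
    PySem.Chars.stripChars s ['-'] = pvRstrip (pvLstrip s) := by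
  rw [PySem.Chars.stripChars]
  unfold pvRstrip pvLstrip
  have hp : (fun c => List.contains ['-'] c) = pvDashB := by
    funext c
    by_cases h : c = '-' <;> simp [pvDashB, h]
  rw [hp]

-- main bridge: A's normalize-squeeze-strip equals B's single pass, on any char list
theorem pvMain (j : List Char) :
    PySem.Chars.stripChars (pvWhileA (j.map pvF)) ['-'] = pvGHead j := by
  rw [pvStripChars_eq, pvWhileA_eq_sq (j.map pvF).length _ le_rfl, pvGHead_spec]

-- assembly: the normalize/squeeze/strip side equals the single-pass side for the same parts
theorem pvAssemble (parts : List (List Char)) :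
    String.mk (PySem.Chars.stripChars
        (pvWhileA ((PySem.Chars.join ['|'] parts).map
          (fun c => if PySem.Chars.isalnum c then c else '-'))) ['-'])
      = String.mk (((PySem.Chars.join ['|'] parts).foldl
          (fun (st : List Char × Bool) ch =>
            if PySem.Chars.isalnum ch then
              ((st.1 ++ (if st.2 && !st.1.isEmpty then ['-'] else [])) ++ [ch], false)
            else (st.1, true)) ([], false)).1) := by
  rw [pvFoldB_head]
  exact congrArg String.mk (pvMain (PySem.Chars.join ['|'] parts))

-- ===== VERDICT (by name: the statement is the Claim_ definition above) =====
theorem build_lookup_key_py_spec : Claim_equal_build_lookup_key_py := by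
  intro record _
  show build_lookup_key_py record = build_lookup_key_py_alt record
  exact pvAssemble (pvKeys.foldl (fun parts key =>
    match (PySem.Dict.mk record).get? key with
    | none => parts
    | some value =>
      if value.toList.isEmpty then parts else parts ++ [PySem.Chars.lower value.toList]) [])
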